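-- pv_equiv track=rewrite | github.com/jhcwalsh/PensionPlanIntelligence | lib/eval_harness.py | _lists_match
-- ===== SOURCE A (Python) =====
-- from typing import Any, Iterable
--
-- STRING_LEV_TOLERANCE = 2
--
-- def _levenshtein(a: str, b: str) -> int:
--     if a == b:
--         return 0
--     if not a:
--         return len(b)
--     if not b:
--         return len(a)
--     prev = list(range(len(b) + 1))
--     for i, ca in enumerate(a, 1):
--         curr = [i]
--         for j, cb in enumerate(b, 1):
--             cost = 0 if ca == cb else 1
--             curr.append(min(curr[-1] + 1, prev[j] + 1, prev[j - 1] + cost))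
--         prev = curr
--     return prev[-1]
--
-- def _norm_str(s: Any) -> str:
--     return ("" if s is None else str(s)).strip().lower()
--
-- def _lists_match(a: Any, b: Any) -> bool:
--     a = a or []
--     b = b or []
--     if len(a) != len(b):
--         return False
--     a_norm = sorted(_norm_str(x) for x in a)
--     b_norm = sorted(_norm_str(x) for x in b)
--     return all(
--         ax == bx or _levenshtein(ax, bx) <= STRING_LEV_TOLERANCE
--         for ax, bx in zip(a_norm, b_norm)
--     )
-- ===== SOURCE B (Python) =====
-- from typing import Any
--
-- STRING_LEV_TOLERANCE = 2
--
-- def _norm_str(s: Any) -> str: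
--     return ("" if s is None else str(s)).strip().lower()
--
-- def _within(a: str, b: str, k: int) -> bool:
--     # True iff Levenshtein distance(a, b) <= k: bounded three-way branching
--     # from the right end with common-suffix stripping (no full DP table).
--     la, lb = len(a), len(b)
--     while la and lb and a[la - 1] == b[lb - 1]:
--         la -= 1
--         lb -= 1
--     a, b = a[:la], b[:lb]
--     if not a:
--         return lb <= k
--     if not b:
--         return la <= k
--     if k == 0:
--         return False
--     return (_within(a[:-1], b, k - 1)
--             or _within(a, b[:-1], k - 1)
--             or _within(a[:-1], b[:-1], k - 1))
--
-- def _lists_match(a: Any, b: Any) -> bool: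
--     a = a or []
--     b = b or []
--     if len(a) != len(b):
--         return False
--     a_norm = sorted(_norm_str(x) for x in a)
--     b_norm = sorted(_norm_str(x) for x in b)
--     return all(_within(ax, bx, STRING_LEV_TOLERANCE) for ax, bx in zip(a_norm, b_norm))
-- ===== Notes on version B (the rewrite author's own statement) =====
-- stated objective: alternative
-- what changed: Per pair of normalized strings, the full two-row Levenshtein DP followed by a <=2 threshold test is replaced by a bounded-depth (tolerance 2) three-way recursion from the string ends with common-suffix stripping, which decides distance<=2 directly.
import Mathlib
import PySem

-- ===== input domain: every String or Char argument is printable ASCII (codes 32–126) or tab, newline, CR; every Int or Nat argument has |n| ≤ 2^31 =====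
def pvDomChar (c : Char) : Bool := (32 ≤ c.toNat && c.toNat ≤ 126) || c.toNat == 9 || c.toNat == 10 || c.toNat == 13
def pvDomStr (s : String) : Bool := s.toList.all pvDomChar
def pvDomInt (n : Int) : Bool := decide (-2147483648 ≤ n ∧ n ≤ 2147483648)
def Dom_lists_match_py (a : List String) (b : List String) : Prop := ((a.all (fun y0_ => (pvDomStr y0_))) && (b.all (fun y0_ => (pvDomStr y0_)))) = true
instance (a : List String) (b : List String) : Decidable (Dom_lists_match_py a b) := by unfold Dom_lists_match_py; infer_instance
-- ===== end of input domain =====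

-- B replaces the full two-row Levenshtein DP per pair by a bounded-depth three-way
-- recursion from the string ends with common-suffix stripping (tolerance fixed at 2).
-- Objective: alternative (a genuinely different algorithm; not measured faster).

-- ===== PORT A =====
-- _norm_str (shared verbatim by both Pythons): str(s).strip().lower()
def normStr (s : String) : String := PySem.Str.lower (PySem.Str.strip s)

-- _levenshtein: two-row DP, transliterated
def levA (a b : String) : Int :=
  if a = b then 0
  else if a.toList = [] then PySem.Str.len b
  else if b.toList = [] then PySem.Str.len a
  else
    let prev0 : List Int := PySem.List.pyRange 0 (PySem.Str.len b + 1) 1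
    let final := (PySem.List.enumerate a.toList 1).foldl
      (fun (prev : List Int) (ic : Int × Char) =>
        (PySem.List.enumerate b.toList 1).foldl
          (fun (curr : List Int) (jc : Int × Char) =>
            let cost : Int := if ic.2 = jc.2 then 0 else 1
            curr ++ [min (min (PySem.List.pyGetD curr (-1) 0 + 1)
                              (PySem.List.pyGetD prev jc.1 0 + 1))
                         (PySem.List.pyGetD prev (jc.1 - 1) 0 + cost)])
          [ic.1])
      prev0
    PySem.List.pyGetD final (-1) 0

def lists_match_py (a : List String) (b : List String) : Bool :=
  if a.length != b.length then false
  else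
    let aN := PySem.List.sorted (a.map normStr) (fun x => x) false
    let bN := PySem.List.sorted (b.map normStr) (fun x => x) false
    (aN.zip bN).all (fun p => p.1 == p.2 || decide (levA p.1 p.2 ≤ 2))

-- ===== PORT B =====
-- _within works from the right-hand end of both strings; its Lean port runs on the
-- REVERSED character lists, so "strip common suffix / drop last char" becomes
-- head-matching / tail, which is the standard transcription.
def withinRev (a b : List Char) (k : Nat) : Bool :=
  match a, b with
  | x :: a', y :: b' =>
    if x = y then withinRev a' b' k
    else if k = 0 then false
    else withinRev a' (y :: b') (k - 1) || withinRev (x :: a') b' (k - 1) ||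
         withinRev a' b' (k - 1)
  | [], bb => decide (bb.length ≤ k)
  | aa, [] => decide (aa.length ≤ k)
termination_by (k, a.length + b.length)

def lists_match_py_alt (a : List String) (b : List String) : Bool :=
  if a.length != b.length then false
  else
    let aN := PySem.List.sorted (a.map normStr) (fun x => x) false
    let bN := PySem.List.sorted (b.map normStr) (fun x => x) false
    (aN.zip bN).all (fun p => withinRev p.1.toList.reverse p.2.toList.reverse 2)

-- ===== PRECONDITION & SPEC =====
def Spec_lists_match_py (a : List String) (b : List String) (out : Bool) : Prop := out = lists_match_py_alt a b
instance (a : List String) (b : List String) (out : Bool) : Decidable (Spec_lists_match_py a b out) := by unfold Spec_lists_match_py; infer_instance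

-- ===== CLAIM (what is proved, stated in full; the proofs are below) =====
def Claim_equal_lists_match_py : Prop := ∀ (a : List String) (b : List String), Dom_lists_match_py a b → Spec_lists_match_py a b (lists_match_py a b)

-- ===== LEMMAS AND PROOFS =====

def levR : List Char → List Char → Nat
  | [], b => b.length
  | a, [] => a.length
  | x :: a, y :: b =>
    min (min (levR a (y :: b) + 1) (levR (x :: a) b + 1))
        (levR a b + (if x = y then 0 else 1))
termination_by a b => a.length + b.length

theorem levR_nil_left (b : List Char) : levR [] b = b.length := by
  cases b <;> simp [levR]

theorem levR_nil_right (a : List Char) : levR a [] = a.length := by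
  cases a <;> simp [levR]

theorem levR_add_left (u v : List Char) (c : Char) : levR (c :: u) v ≤ levR u v + 1 := by
  cases v with
  | nil => simp [levR_nil_right]
  | cons y v' => rw [levR]; omega

theorem levR_add_right (u v : List Char) (c : Char) : levR u (c :: v) ≤ levR u v + 1 := by
  cases u with
  | nil => simp [levR]
  | cons x u' => rw [levR]; have := min_le_left (min (levR u' (c :: v) + 1) (levR (x :: u') v + 1)) (levR u' v + (if x = c then 0 else 1)); omega

theorem levR_cons_le :
    ∀ (n : ℕ) (u v : List Char), u.length + v.length ≤ n →
      (∀ c, levR u v ≤ levR (c :: u) v + 1) ∧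
      (∀ c, levR u v ≤ levR u (c :: v) + 1) := by
  intro n
  induction n with
  | zero =>
    intro u v h
    have hu : u = [] := by cases u <;> simp_all
    have hv : v = [] := by cases v <;> simp_all
    subst hu; subst hv
    constructor <;> intro c <;> simp [levR, levR_nil_right]
  | succ n ih =>
    intro u v h
    constructor
    · intro c
      cases v with
      | nil => simp [levR_nil_right]; omega
      | cons y v' =>
        have ihl := (ih u v' (by simp at h ⊢; omega)).1 c
        have hadd := levR_add_right u v' y
        rw [show levR (c :: u) (y :: v') =
          min (min (levR u (y :: v') + 1) (levR (c :: u) v' + 1))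
              (levR u v' + (if c = y then 0 else 1)) from by rw [levR]]
        have hc : (if c = y then 0 else 1) ≤ 1 := by split <;> omega
        omega
    · intro c
      cases u with
      | nil => simp [levR]; omega
      | cons x u' =>
        have ihr := (ih u' v (by simp at h ⊢; omega)).2 c
        have hadd := levR_add_left u' v x
        rw [show levR (x :: u') (c :: v) =
          min (min (levR u' (c :: v) + 1) (levR (x :: u') v + 1))
              (levR u' v + (if x = c then 0 else 1)) from by rw [levR]]
        have hc : (if x = c then 0 else 1) ≤ 1 := by split <;> omega
        omega

theorem levR_cons_cons_same (u v : List Char) (c : Char) :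
    levR (c :: u) (c :: v) = levR u v := by
  have h1 := (levR_cons_le (u.length + (c :: v).length) u (c :: v) le_rfl).1 c
  have h2 := (levR_cons_le (u.length + v.length) u v le_rfl).1
  have h3 := (levR_cons_le ((c :: u).length + v.length) (c :: u) v le_rfl).2 c
  rw [show levR (c :: u) (c :: v) =
      min (min (levR u (c :: v) + 1) (levR (c :: u) v + 1))
          (levR u v + (if c = c then 0 else 1)) from by rw [levR]]
  have h4 := (levR_cons_le (u.length + v.length) u v le_rfl).2 c
  have h5 := (levR_cons_le (u.length + v.length) u v le_rfl).1 c
  have he : (if c = c then (0:Nat) else 1) = 0 := by simp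
  rw [he]
  omega

theorem levR_self (u : List Char) : levR u u = 0 := by
  induction u with
  | nil => simp [levR]
  | cons c u ihu => rw [levR_cons_cons_same]; exact ihu

theorem withinRev_eq (u v : List Char) (k : Nat) :
    withinRev u v k = decide (levR u v ≤ k) := by
  fun_induction withinRev u v k with
  | case1 =>
    rename_i k a' c b' ih
    rw [ih, levR_cons_cons_same]
  | case2 =>
    rename_i x a' y b' hxy
    rw [show levR (x :: a') (y :: b') =
        min (min (levR a' (y :: b') + 1) (levR (x :: a') b' + 1))
            (levR a' b' + (if x = y then 0 else 1)) from by rw [levR]]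
    simp only [if_neg hxy]
    symm
    rw [decide_eq_false_iff_not]
    omega
  | case3 =>
    rename_i k x a' y b' hxy hk ih1 ih2 ih3
    rw [ih1, ih2, ih3]
    rw [
      show levR (x :: a') (y :: b') =
        min (min (levR a' (y :: b') + 1) (levR (x :: a') b' + 1))
            (levR a' b' + (if x = y then 0 else 1)) from by rw [levR]]
    simp only [if_neg hxy]
    rcases Nat.exists_eq_succ_of_ne_zero hk with ⟨m, rfl⟩
    simp only [Nat.succ_sub_one]
    by_cases h1 : levR a' (y :: b') ≤ m <;> by_cases h2 : levR (x :: a') b' ≤ m <;>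
      by_cases h3 : levR a' b' ≤ m <;> simp [h1, h2, h3]
  | case4 =>
    rename_i k bb
    simp [levR_nil_left]
  | case5 =>
    rename_i k aa h
    simp [levR_nil_right]

def dpRow (u b : List Char) : List Int :=
  (List.range (b.length + 1)).map (fun j => (levR u.reverse ((b.take j).reverse) : Int))

theorem dpRow_init (b : List Char) :
    PySem.List.pyRange 0 ((b.length : Int) + 1) 1 = dpRow [] b := by
  rw [PySem.List.pyRange_one]
  unfold dpRow
  rw [show (((b.length : Int) + 1) - 0).toNat = b.length + 1 by omega]
  apply List.map_congr_left
  intro k hk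
  rw [List.mem_range] at hk
  rw [List.reverse_nil, levR_nil_left]
  simp
  omega

theorem dp_cell (u w : List Char) (c cb : Char) :
    (levR ((u ++ [c]).reverse) ((w ++ [cb]).reverse) : Int) =
      min (min ((levR ((u ++ [c]).reverse) (w.reverse) : Int) + 1)
               ((levR u.reverse ((w ++ [cb]).reverse) : Int) + 1))
          ((levR u.reverse (w.reverse) : Int) + (if c = cb then 0 else 1)) := by
  rw [List.reverse_append, List.reverse_append]
  simp only [List.reverse_cons, List.reverse_nil, List.nil_append, List.singleton_append]
  rw [show levR (c :: u.reverse) (cb :: w.reverse) =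
      min (min (levR u.reverse (cb :: w.reverse) + 1) (levR (c :: u.reverse) w.reverse + 1))
          (levR u.reverse w.reverse + (if c = cb then 0 else 1)) from by rw [levR]]
  push_cast [Nat.cast_min]
  split_ifs <;> omega

theorem dp_inner (u : List Char) (c : Char) (b : List Char) :
    ∀ (bs w : List Char), b = w ++ bs →
    (PySem.List.enumerate bs ((w.length : Int) + 1)).foldl
      (fun (curr : List Int) (jc : Int × Char) =>
        curr ++ [min (min (PySem.List.pyGetD curr (-1) 0 + 1)
                          (PySem.List.pyGetD (dpRow u b) jc.1 0 + 1))
                     (PySem.List.pyGetD (dpRow u b) (jc.1 - 1) 0 + (if c = jc.2 then 0 else 1))])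
      ((List.range (w.length + 1)).map
        (fun j => (levR ((u ++ [c]).reverse) ((b.take j).reverse) : Int)))
    = dpRow (u ++ c :: []) b := by
  intro bs
  induction bs with
  | nil =>
    intro w hb
    rw [PySem.List.enumerate_nil, List.foldl_nil]
    unfold dpRow
    rw [hb, List.append_nil]
  | cons cb bs' ih =>
    intro w hb
    rw [PySem.List.enumerate_cons, List.foldl_cons]
    have hlen : b.length = w.length + 1 + bs'.length := by rw [hb]; simp; omega
    have hstep :
        ((List.range (w.length + 1)).map
          (fun j => (levR ((u ++ [c]).reverse) ((b.take j).reverse) : Int))) ++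
          [min (min (PySem.List.pyGetD ((List.range (w.length + 1)).map
                       (fun j => (levR ((u ++ [c]).reverse) ((b.take j).reverse) : Int))) (-1) 0 + 1)
                    (PySem.List.pyGetD (dpRow u b) ((w.length : Int) + 1) 0 + 1))
               (PySem.List.pyGetD (dpRow u b) ((w.length : Int) + 1 - 1) 0 + (if c = cb then 0 else 1))]
        = (List.range (w.length + 1 + 1)).map
            (fun j => (levR ((u ++ [c]).reverse) ((b.take j).reverse) : Int)) := by
      -- evaluate the three indexings
      rw [List.range_succ (n := w.length + 1)]
      rw [List.map_append]
      congr 1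
      rw [List.range_succ (n := w.length)] 
      rw [List.map_append]
      simp only [List.map_cons, List.map_nil]
      rw [PySem.List.pyGetD_neg_one_append_singleton]
      congr 1
      -- now the cell equation
      rw [show ((w.length : Int) + 1 - 1) = ((w.length : Nat) : Int) by omega]
      rw [show ((w.length : Int) + 1) = (((w.length + 1 : Nat) : Nat) : Int) by push_cast; ring]
      rw [PySem.List.pyGetD_natCast, PySem.List.pyGetD_natCast]
      unfold dpRow
      rw [PySem.List.getD_map_range _ _ _ _ (by omega),
          PySem.List.getD_map_range _ _ _ _ (by omega)]
      have htake1 : b.take (w.length + 1) = w ++ [cb] := by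
        rw [hb]; simp [List.take_append]
      have htake0 : b.take w.length = w := by
        rw [hb]; simp
      rw [htake1, htake0]
      rw [dp_cell u w c cb]
    rw [hstep]
    have := ih (w ++ [cb]) (by rw [hb]; simp)
    simp only [List.length_append, List.length_cons, List.length_nil] at this ⊢
    rw [show ((w.length : Int) + 1 + 1) = (((w.length + 1 : Nat) : Int) + 1) by push_cast; ring]
    rw [show w.length + 1 + 1 = w.length + 1 + 0 + 1 by omega]
    exact this

theorem dp_outer (b : List Char) : ∀ (as u : List Char),
    (PySem.List.enumerate as ((u.length : Int) + 1)).foldl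
      (fun (prev : List Int) (ic : Int × Char) =>
        (PySem.List.enumerate b 1).foldl
          (fun (curr : List Int) (jc : Int × Char) =>
            curr ++ [min (min (PySem.List.pyGetD curr (-1) 0 + 1)
                              (PySem.List.pyGetD prev jc.1 0 + 1))
                         (PySem.List.pyGetD prev (jc.1 - 1) 0 +
                            (if ic.2 = jc.2 then 0 else 1))])
          [ic.1])
      (dpRow u b)
    = dpRow (u ++ as) b := by
  intro as
  induction as with
  | nil =>
    intro u
    rw [PySem.List.enumerate_nil, List.foldl_nil, List.append_nil]
  | cons c as' ih =>
    intro u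
    rw [PySem.List.enumerate_cons, List.foldl_cons]
    have hin := dp_inner u c b b [] rfl
    simp only [List.length_nil, Nat.cast_zero, zero_add] at hin
    have hinit : [((u.length : Int) + 1)] =
        (List.range (0 + 1)).map
          (fun j => (levR ((u ++ [c]).reverse) ((b.take j).reverse) : Int)) := by
      simp [levR_nil_right]
    have harg : (PySem.List.enumerate b 1).foldl
          (fun (curr : List Int) (jc : Int × Char) =>
            curr ++ [min (min (PySem.List.pyGetD curr (-1) 0 + 1)
                              (PySem.List.pyGetD (dpRow u b) jc.1 0 + 1))
                         (PySem.List.pyGetD (dpRow u b) (jc.1 - 1) 0 +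
                            (if c = jc.2 then 0 else 1))])
          [((u.length : Int) + 1)] = dpRow (u ++ [c]) b := by
      rw [hinit]
      simpa using hin
    simp only []
    rw [harg]
    have h2 := ih (u ++ [c])
    simp only [List.length_append, List.length_cons, List.length_nil, Nat.cast_add,
      Nat.cast_one, Nat.cast_zero, List.append_assoc, List.singleton_append] at h2
    simpa using h2

theorem levA_eq (s t : String) :
    levA s t = (levR s.toList.reverse t.toList.reverse : Int) := by
  unfold levA
  split_ifs with h1 h2 h3
  · subst h1; rw [levR_self]; rfl
  · rw [h2]; simp [PySem.Str.len_eq, levR_nil_left]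
  · rw [h3]; simp [PySem.Str.len_eq, levR_nil_right]
  · have hd := dp_outer t.toList s.toList []
    simp only [List.length_nil, Nat.cast_zero, zero_add, List.nil_append] at hd
    show PySem.List.pyGetD
        ((PySem.List.enumerate s.toList 1).foldl
          (fun (prev : List Int) (ic : Int × Char) =>
            (PySem.List.enumerate t.toList 1).foldl
              (fun (curr : List Int) (jc : Int × Char) =>
                curr ++ [min (min (PySem.List.pyGetD curr (-1) 0 + 1)
                                  (PySem.List.pyGetD prev jc.1 0 + 1))
                             (PySem.List.pyGetD prev (jc.1 - 1) 0 +
                                (if ic.2 = jc.2 then 0 else 1))])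
              [ic.1])
          (PySem.List.pyRange 0 (PySem.Str.len t + 1) 1)) (-1) 0 = _
    rw [PySem.Str.len_eq, dpRow_init]
    rw [hd]
    rw [show dpRow s.toList t.toList =
        (List.range t.toList.length).map
          (fun j => (levR s.toList.reverse ((t.toList.take j).reverse) : Int)) ++
        [(levR s.toList.reverse ((t.toList.take t.toList.length).reverse) : Int)] from by
      rw [dpRow, List.range_succ, List.map_append]; rfl]
    rw [PySem.List.pyGetD_neg_one_append_singleton, List.take_length]

theorem pair_eq (s t : String) :
    (s == t || decide (levA s t ≤ 2)) = withinRev s.toList.reverse t.toList.reverse 2 := by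
  rw [withinRev_eq, levA_eq]
  by_cases h : s = t
  · subst h
    simp [levR_self]
  · have hb : (s == t) = false := by simp [h]
    rw [hb]
    simp only [Bool.false_or]
    have hc : ((levR s.toList.reverse t.toList.reverse : Int) ≤ 2) ↔
        (levR s.toList.reverse t.toList.reverse ≤ 2) := by omega
    simp [hc]

-- ===== VERDICT (by name: the statement is the Claim_ definition above) =====
theorem lists_match_py_spec : Claim_equal_lists_match_py := by
  intro a b _
  unfold Spec_lists_match_py lists_match_py lists_match_py_alt
  have hf : (fun p : String × String => p.1 == p.2 || decide (levA p.1 p.2 ≤ 2)) =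
      (fun p : String × String => withinRev p.1.toList.reverse p.2.toList.reverse 2) :=
    funext fun p => pair_eq p.1 p.2
  rw [hf]
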